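-- pv_equiv track=rewrite | github.com/shboomba/Sequence-Alignment | CSCI570_Project_Minimum_Jul_14/efficient.py | compute_last_row
-- ===== SOURCE A (Python) =====
-- def get_mismatch_cost(char1, char2, mismatch_arr):
--     """Get mismatch cost between two characters"""
--     if char1 == '_' or char2 == '_':
--         return 0
--     index1 = "ACGT".index(char1)
--     index2 = "ACGT".index(char2)
--     return mismatch_arr[index1][index2]
--
-- def compute_last_row(seq1, seq2, gap, mismatch_arr):
--     """
--     Compute the last row of DP table using only O(n) space.
--     Returns array where dp[j] = minimum cost to align seq1 with seq2[0:j]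
--     """
--     m = len(seq1)
--     n = len(seq2)
--
--     # We only need current and previous row
--     prev = [j * gap for j in range(n + 1)]
--
--     for i in range(1, m + 1):
--         curr = [i * gap]  # First column
--
--         for j in range(1, n + 1):
--             # Three choices: match/mismatch, gap in seq1, gap in seq2
--             mismatch_cost = get_mismatch_cost(seq1[i-1], seq2[j-1], mismatch_arr)
--             match = prev[j-1] + mismatch_cost
--             gap_seq1 = prev[j] + gap
--             gap_seq2 = curr[j-1] + gap
--
--             curr.append(min(match, gap_seq1, gap_seq2))
--
--         prev = curr
--
--     return prev
-- ===== SOURCE B (Python) =====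
-- def compute_last_row(seq1, seq2, gap, mismatch_arr):
--     """Column-wise DP: sweep seq2 positions, keep one column of length len(seq1)+1,
--     record each column's last entry."""
--     col = [i * gap for i in range(len(seq1) + 1)]
--     result = [col[-1]]
--     for ch2 in seq2:
--         new = [col[0] + gap]
--         diag = col[0]
--         for c1, above in zip(seq1, col[1:]):
--             if c1 == '_' or ch2 == '_':
--                 cost = 0
--             else:
--                 cost = mismatch_arr["ACGT".index(c1)]["ACGT".index(ch2)]
--             new.append(min(diag + cost, above + gap, new[-1] + gap))
--             diag = above
--         col = new
--         result.append(col[-1])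
--     return result
-- ===== Notes on version B (the rewrite author's own statement) =====
-- stated objective: alternative
-- what changed: B transposes the DP traversal: instead of sweeping rows over seq1 while keeping the previous row of length len(seq2)+1 and returning the final row, B sweeps columns over seq2 while maintaining a single column of length len(seq1)+1 (walked with a carried diagonal over zip(seq1, col[1:])) and accumulates each column's last entry into the result list.
import Mathlib
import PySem

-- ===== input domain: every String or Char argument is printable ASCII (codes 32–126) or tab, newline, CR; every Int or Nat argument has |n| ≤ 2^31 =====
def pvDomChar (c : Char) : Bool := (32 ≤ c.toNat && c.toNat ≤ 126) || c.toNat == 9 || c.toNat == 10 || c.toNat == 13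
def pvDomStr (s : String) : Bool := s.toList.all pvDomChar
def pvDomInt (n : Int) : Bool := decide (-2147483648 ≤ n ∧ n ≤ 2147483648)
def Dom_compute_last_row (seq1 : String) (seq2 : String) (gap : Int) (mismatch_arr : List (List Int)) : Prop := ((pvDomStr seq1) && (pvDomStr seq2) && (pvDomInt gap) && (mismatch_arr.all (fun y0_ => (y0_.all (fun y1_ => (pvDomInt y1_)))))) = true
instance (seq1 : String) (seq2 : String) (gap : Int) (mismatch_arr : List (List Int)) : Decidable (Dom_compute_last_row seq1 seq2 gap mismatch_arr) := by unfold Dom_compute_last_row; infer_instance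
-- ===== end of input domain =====

-- B computes the same DP table column by column (outer loop over seq2, one column of
-- length len(seq1)+1 maintained) and collects each column's last entry; same values, same cost.

-- ===== PORT A =====
def get_mismatch_cost (char1 : Char) (char2 : Char) (mismatch_arr : List (List Int)) : Int :=
  if char1 = '_' ∨ char2 = '_' then 0
  else
    let index1 := (PySem.List.index? "ACGT".toList char1).getD 0
    let index2 := (PySem.List.index? "ACGT".toList char2).getD 0
    PySem.List.pyGetD (PySem.List.pyGetD mismatch_arr (index1 : Int) []) (index2 : Int) 0

def compute_last_row (seq1 : String) (seq2 : String) (gap : Int) (mismatch_arr : List (List Int)) : List Int :=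
  let s1 := seq1.toList
  let s2 := seq2.toList
  let m : Int := s1.length
  let n : Int := s2.length
  let prev := (PySem.List.pyRange 0 (n + 1) 1).map (fun j => j * gap)
  (PySem.List.pyRange 1 (m + 1) 1).foldl (fun prev i =>
    (PySem.List.pyRange 1 (n + 1) 1).foldl (fun curr j =>
      let mismatch_cost := get_mismatch_cost (PySem.List.pyGetD s1 (i - 1) ' ') (PySem.List.pyGetD s2 (j - 1) ' ') mismatch_arr
      let mtch := PySem.List.pyGetD prev (j - 1) 0 + mismatch_cost
      let gap_seq1 := PySem.List.pyGetD prev j 0 + gap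
      let gap_seq2 := PySem.List.pyGetD curr (j - 1) 0 + gap
      curr ++ [min (min mtch gap_seq1) gap_seq2]) [i * gap]) prev

-- ===== PORT B =====
def compute_last_row_alt (seq1 : String) (seq2 : String) (gap : Int) (mismatch_arr : List (List Int)) : List Int :=
  let s1 := seq1.toList
  let col0 := (PySem.List.pyRange 0 ((s1.length : Int) + 1) 1).map (fun i => i * gap)
  (seq2.toList.foldl (fun st ch2 =>
      let col := st.1
      let start := PySem.List.pyGetD col 0 0 + gap
      let inner := (s1.zip (PySem.List.slice col (some 1) none)).foldl
        (fun (st2 : List Int × Int) cw =>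
          let cost := if cw.1 = '_' ∨ ch2 = '_' then 0
            else PySem.List.pyGetD (PySem.List.pyGetD mismatch_arr (((PySem.List.index? "ACGT".toList cw.1).getD 0 : Nat) : Int) [])
                   (((PySem.List.index? "ACGT".toList ch2).getD 0 : Nat) : Int) 0
          (st2.1 ++ [min (min (st2.2 + cost) (cw.2 + gap)) (PySem.List.pyGetD st2.1 (-1) 0 + gap)], cw.2))
        ([start], PySem.List.pyGetD col 0 0)
      (inner.1, st.2 ++ [PySem.List.pyGetD inner.1 (-1) 0]))
    (col0, [PySem.List.pyGetD col0 (-1) 0])).2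

-- ===== PRECONDITION & SPEC =====
-- Pre_ excludes exactly the inputs where Python A raises: some pair of aligned characters
-- (both ≠ '_') is outside "ACGT" (ValueError from str.index) or outside mismatch_arr's
-- shape (IndexError).  The Lean ports are total; the equivalence proof does not need Pre_.
def pvCostOk (c1 : Char) (c2 : Char) (mismatch_arr : List (List Int)) : Bool :=
  match PySem.List.index? "ACGT".toList c1, PySem.List.index? "ACGT".toList c2 with
  | some i1, some i2 =>
      match PySem.List.pyGet? mismatch_arr (i1 : Int) with
      | some row => (PySem.List.pyGet? row (i2 : Int)).isSome
      | none => false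
  | _, _ => false

def Pre_compute_last_row (seq1 : String) (seq2 : String) (gap : Int) (mismatch_arr : List (List Int)) : Prop :=
  (seq1.toList.all (fun c1 => seq2.toList.all (fun c2 =>
    (decide (c1 = '_') || decide (c2 = '_')) || pvCostOk c1 c2 mismatch_arr))) = true
instance (seq1 : String) (seq2 : String) (gap : Int) (mismatch_arr : List (List Int)) : Decidable (Pre_compute_last_row seq1 seq2 gap mismatch_arr) := by unfold Pre_compute_last_row; infer_instance

def pvWitness_compute_last_row : String × String × Int × List (List Int) :=
  ("AC_", "G_T", 2, [[0, 1, 2, 3], [1, 0, 2, 3], [2, 2, 0, 3], [3, 3, 3, 0]])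

def Spec_compute_last_row (seq1 : String) (seq2 : String) (gap : Int) (mismatch_arr : List (List Int)) (out : List Int) : Prop := out = compute_last_row_alt seq1 seq2 gap mismatch_arr
instance (seq1 : String) (seq2 : String) (gap : Int) (mismatch_arr : List (List Int)) (out : List Int) : Decidable (Spec_compute_last_row seq1 seq2 gap mismatch_arr out) := by unfold Spec_compute_last_row; infer_instance

-- ===== CLAIM (what is proved, stated in full; the proofs are below) =====
def Claim_equal_compute_last_row : Prop := ∀ (seq1 : String) (seq2 : String) (gap : Int) (mismatch_arr : List (List Int)), Dom_compute_last_row seq1 seq2 gap mismatch_arr → Pre_compute_last_row seq1 seq2 gap mismatch_arr → Spec_compute_last_row seq1 seq2 gap mismatch_arr (compute_last_row seq1 seq2 gap mismatch_arr)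

-- ===== LEMMAS AND PROOFS =====

-- The alignment-DP value dp(i, j), written as a function of the REVERSED prefixes
-- r1 = (s1.take i).reverse and r2 = (s2.take j).reverse.
def dpD (gap : Int) (arr : List (List Int)) : List Char → List Char → Int
  | [], r2 => r2.length * gap
  | _ :: r1, [] => (r1.length + 1) * gap
  | c1 :: r1, c2 :: r2 =>
      min (min (dpD gap arr r1 r2 + get_mismatch_cost c1 c2 arr)
               (dpD gap arr r1 (c2 :: r2) + gap))
          (dpD gap arr (c1 :: r1) r2 + gap)
  termination_by r1 r2 => r1.length + r2.length
  decreasing_by all_goals first | (simp; omega) | simp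

theorem dpD_nil (gap : Int) (arr : List (List Int)) (r2 : List Char) :
    dpD gap arr [] r2 = r2.length * gap := by cases r2 <;> simp [dpD]

theorem dpD_nil_right (gap : Int) (arr : List (List Int)) (r1 : List Char) :
    dpD gap arr r1 [] = r1.length * gap := by
  cases r1 with
  | nil => simp [dpD]
  | cons c r => simp only [dpD, List.length_cons]; push_cast; ring

theorem revtake_succ (l : List Char) (k : Nat) (h : k < l.length) :
    (l.take (k + 1)).reverse = l[k] :: (l.take k).reverse := by
  rw [List.take_add_one, List.getElem?_eq_getElem h]; simp

-- ---- A side: the final row as a map over seq2-prefix lengths ----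
def rowMap (gap : Int) (arr : List (List Int)) (s2 : List Char) (r1 : List Char) : List Int :=
  (List.range (s2.length + 1)).map (fun k => dpD gap arr r1 ((s2.take k).reverse))

def bodyA (gap : Int) (arr : List (List Int)) (s1 s2 : List Char) (prev : List Int) (i : Int) (curr : List Int) (j : Int) : List Int :=
  curr ++ [min (min (PySem.List.pyGetD prev (j - 1) 0 +
      get_mismatch_cost (PySem.List.pyGetD s1 (i - 1) ' ') (PySem.List.pyGetD s2 (j - 1) ' ') arr)
      (PySem.List.pyGetD prev j 0 + gap))
      (PySem.List.pyGetD curr (j - 1) 0 + gap)]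

theorem innerA_aux (gap : Int) (arr : List (List Int)) (s1 s2 : List Char) (i : Nat) (hi : i < s1.length) :
    ∀ j, j ≤ s2.length →
      (List.range j).foldl
        (fun curr (k : Nat) => bodyA gap arr s1 s2 (rowMap gap arr s2 ((s1.take i).reverse)) (1 + (i : Int)) curr (1 + (k : Int)))
        [(1 + (i : Int)) * gap]
      = (List.range (j + 1)).map (fun k => dpD gap arr ((s1.take (i + 1)).reverse) ((s2.take k).reverse)) := by
  intro j
  induction j with
  | zero =>
      intro _
      rw [show (List.range 0) = ([] : List Nat) from rfl, List.foldl_nil,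
          show (0 + 1) = 1 from rfl, List.range_one, List.map_cons, List.map_nil,
          List.take_zero, List.reverse_nil, revtake_succ s1 i hi]
      simp only [dpD, List.length_reverse, List.length_take, Nat.min_eq_left (le_of_lt hi)]
      ring
  | succ j ih =>
      intro hj
      rw [List.range_succ, List.foldl_append, ih (by omega)]
      simp only [List.foldl_cons, List.foldl_nil]
      have e0 : (1 : Int) + (i : Int) - 1 = ((i : Nat) : Int) := by omega
      have e1 : (1 : Int) + (j : Int) - 1 = ((j : Nat) : Int) := by omega
      have e2 : (1 : Int) + (j : Int) = (((j + 1 : Nat)) : Int) := by omega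
      unfold bodyA
      rw [e0, e1, e2]
      simp only [PySem.List.pyGetD_natCast]
      unfold rowMap
      rw [PySem.List.getD_map_range _ _ _ _ (by omega), PySem.List.getD_map_range _ _ _ _ (by omega),
          PySem.List.getD_map_range _ _ _ _ (by omega)]
      rw [List.getD_eq_getElem s1 ' ' hi, List.getD_eq_getElem s2 ' ' (by omega)]
      rw [show (List.range (j + 1 + 1)) = List.range (j + 1) ++ [j + 1] from List.range_succ,
          List.map_append]
      congr 1
      simp only [List.map_cons, List.map_nil]
      rw [revtake_succ s1 i hi, revtake_succ s2 j (by omega)]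
      simp [dpD]

def rowStepA (gap : Int) (arr : List (List Int)) (s1 s2 : List Char) (prev : List Int) (i : Int) : List Int :=
  (PySem.List.pyRange 1 ((s2.length : Int) + 1) 1).foldl (bodyA gap arr s1 s2 prev i) [i * gap]

theorem stepA (gap : Int) (arr : List (List Int)) (s1 s2 : List Char) (i : Nat) (hi : i < s1.length) :
    rowStepA gap arr s1 s2 (rowMap gap arr s2 ((s1.take i).reverse)) (1 + (i : Int))
    = rowMap gap arr s2 ((s1.take (i + 1)).reverse) := by
  unfold rowStepA
  rw [PySem.List.pyRange_one]
  rw [show (((s2.length : Int) + 1) - 1).toNat = s2.length by omega, List.foldl_map]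
  exact innerA_aux gap arr s1 s2 i hi s2.length (le_refl _)

theorem outerA_aux (gap : Int) (arr : List (List Int)) (s1 s2 : List Char) :
    ∀ i, i ≤ s1.length →
      (List.range i).foldl (fun prev (k : Nat) => rowStepA gap arr s1 s2 prev (1 + (k : Int))) (rowMap gap arr s2 [])
      = rowMap gap arr s2 ((s1.take i).reverse) := by
  intro i
  induction i with
  | zero => intro _; simp
  | succ i ih =>
      intro hi
      rw [List.range_succ, List.foldl_append, ih (by omega)]
      simpa using stepA gap arr s1 s2 i (by omega)

theorem initA (gap : Int) (arr : List (List Int)) (s2 : List Char) :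
    (PySem.List.pyRange 0 ((s2.length : Int) + 1) 1).map (fun j => j * gap) = rowMap gap arr s2 [] := by
  rw [PySem.List.pyRange_one]
  rw [show (((s2.length : Int) + 1) - 0).toNat = s2.length + 1 by omega]
  unfold rowMap
  rw [List.map_map]
  apply List.map_congr_left
  intro k hk
  simp only [List.mem_range] at hk
  simp only [Function.comp_apply]
  rw [dpD_nil]
  simp [List.length_take, Nat.min_eq_left (by omega : k ≤ s2.length)]

theorem compute_last_row_eq (seq1 : String) (seq2 : String) (gap : Int) (arr : List (List Int)) :
    compute_last_row seq1 seq2 gap arr = rowMap gap arr seq2.toList seq1.toList.reverse := by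
  show (PySem.List.pyRange 1 ((seq1.toList.length : Int) + 1) 1).foldl
      (fun prev i => rowStepA gap arr seq1.toList seq2.toList prev i)
      ((PySem.List.pyRange 0 ((seq2.toList.length : Int) + 1) 1).map (fun j => j * gap))
      = rowMap gap arr seq2.toList seq1.toList.reverse
  rw [initA gap arr seq2.toList]
  rw [PySem.List.pyRange_one]
  rw [show (((seq1.toList.length : Int) + 1) - 1).toNat = seq1.toList.length by omega, List.foldl_map]
  have := outerA_aux gap arr seq1.toList seq2.toList seq1.toList.length (le_refl _)
  rw [List.take_length] at this
  exact this

-- ---- B side ----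
def bodyB (gap : Int) (arr : List (List Int)) (ch2 : Char) (st2 : List Int × Int) (cw : Char × Int) : List Int × Int :=
  (st2.1 ++ [min (min (st2.2 + get_mismatch_cost cw.1 ch2 arr) (cw.2 + gap)) (PySem.List.pyGetD st2.1 (-1) 0 + gap)], cw.2)

-- values of the column for r2 along seq1-extensions of the reversed prefix r1
def extVals (gap : Int) (arr : List (List Int)) (r2 : List Char) : List Char → List Char → List Int
  | _, [] => []
  | r1, c :: u => dpD gap arr (c :: r1) r2 :: extVals gap arr r2 (c :: r1) u

def colList (gap : Int) (arr : List (List Int)) (s1 : List Char) (r2 : List Char) : List Int :=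
  dpD gap arr [] r2 :: extVals gap arr r2 [] s1

-- last entries of the successive columns
def lastVals (gap : Int) (arr : List (List Int)) (s1 : List Char) : List Char → List Char → List Int
  | _, [] => []
  | r2, c2 :: l2 => dpD gap arr s1.reverse (c2 :: r2) :: lastVals gap arr s1 (c2 :: r2) l2

theorem innerB (gap : Int) (arr : List (List Int)) (ch2 : Char) (r2 : List Char) :
    ∀ (u r1 : List Char) (acc : List Int),
      PySem.List.pyGetD acc (-1) 0 = dpD gap arr r1 (ch2 :: r2) →
      ((u.zip (extVals gap arr r2 r1 u)).foldl (bodyB gap arr ch2) (acc, dpD gap arr r1 r2)).1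
        = acc ++ extVals gap arr (ch2 :: r2) r1 u := by
  intro u
  induction u with
  | nil => intro r1 acc _; simp [extVals]
  | cons c u ih =>
      intro r1 acc h
      simp only [extVals, List.zip_cons_cons, List.foldl_cons]
      have hv : min (min (dpD gap arr r1 r2 + get_mismatch_cost c ch2 arr)
            (dpD gap arr (c :: r1) r2 + gap)) (PySem.List.pyGetD acc (-1) 0 + gap)
          = dpD gap arr (c :: r1) (ch2 :: r2) := by
        rw [h, min_right_comm]; simp [dpD]
      show ((u.zip (extVals gap arr r2 (c :: r1) u)).foldl (bodyB gap arr ch2)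
          (acc ++ [min (min (dpD gap arr r1 r2 + get_mismatch_cost c ch2 arr)
            (dpD gap arr (c :: r1) r2 + gap)) (PySem.List.pyGetD acc (-1) 0 + gap)],
            dpD gap arr (c :: r1) r2)).1 = _
      rw [hv, ih (c :: r1) _ (by rw [PySem.List.pyGetD_neg_one_append_singleton])]
      simp

def newColB (gap : Int) (arr : List (List Int)) (s1 : List Char) (ch2 : Char) (col : List Int) : List Int :=
  ((s1.zip (PySem.List.slice col (some 1) none)).foldl (bodyB gap arr ch2)
    ([PySem.List.pyGetD col 0 0 + gap], PySem.List.pyGetD col 0 0)).1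

def stepB (gap : Int) (arr : List (List Int)) (s1 : List Char) (st : List Int × List Int) (ch2 : Char) : List Int × List Int :=
  (newColB gap arr s1 ch2 st.1, st.2 ++ [PySem.List.pyGetD (newColB gap arr s1 ch2 st.1) (-1) 0])

theorem newColB_eq (gap : Int) (arr : List (List Int)) (s1 : List Char) (ch2 : Char) (r2 : List Char) :
    newColB gap arr s1 ch2 (colList gap arr s1 r2) = colList gap arr s1 (ch2 :: r2) := by
  unfold newColB colList
  rw [PySem.List.slice_from_one, PySem.List.pyGetD_zero_cons]
  show ((s1.zip (extVals gap arr r2 [] s1)).foldl (bodyB gap arr ch2)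
      ([dpD gap arr [] r2 + gap], dpD gap arr [] r2)).1 = _
  have hstart : dpD gap arr [] r2 + gap = dpD gap arr [] (ch2 :: r2) := by
    rw [dpD_nil, dpD_nil]; simp only [List.length_cons]; push_cast; ring
  rw [hstart]
  rw [innerB gap arr ch2 r2 s1 [] [dpD gap arr [] (ch2 :: r2)]
    (by rw [show [dpD gap arr [] (ch2 :: r2)] = [] ++ [dpD gap arr [] (ch2 :: r2)] from rfl,
            PySem.List.pyGetD_neg_one_append_singleton])]
  rfl

theorem extVals_getLast (gap : Int) (arr : List (List Int)) (r2 : List Char) :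
    ∀ (u r1 : List Char) (x : Int), x = dpD gap arr r1 r2 →
      PySem.List.pyGetD (x :: extVals gap arr r2 r1 u) (-1) 0 = dpD gap arr (u.reverse ++ r1) r2 := by
  intro u
  induction u with
  | nil =>
      intro r1 x hx
      rw [show (x :: extVals gap arr r2 r1 []) = [] ++ [x] by simp [extVals],
          PySem.List.pyGetD_neg_one_append_singleton]
      simpa using hx
  | cons c u ih =>
      intro r1 x _
      simp only [extVals]
      have hne : (dpD gap arr (c :: r1) r2 :: extVals gap arr r2 (c :: r1) u) ≠ [] := by simp
      rw [PySem.List.pyGetD_neg_one _ _ (by simp), List.getLast_cons hne,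
          ← PySem.List.pyGetD_neg_one _ _ hne]
      rw [ih (c :: r1) _ rfl]
      simp

theorem colList_last (gap : Int) (arr : List (List Int)) (s1 : List Char) (r2 : List Char) :
    PySem.List.pyGetD (colList gap arr s1 r2) (-1) 0 = dpD gap arr s1.reverse r2 := by
  have := extVals_getLast gap arr r2 s1 [] (dpD gap arr [] r2) rfl
  simpa [colList] using this

theorem outerB (gap : Int) (arr : List (List Int)) (s1 : List Char) :
    ∀ (l2 r2 : List Char) (res : List Int),
      (l2.foldl (stepB gap arr s1) (colList gap arr s1 r2, res)).2
        = res ++ lastVals gap arr s1 r2 l2 := by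
  intro l2
  induction l2 with
  | nil => intro r2 res; simp [lastVals]
  | cons c2 l2 ih =>
      intro r2 res
      rw [List.foldl_cons]
      have hcol : stepB gap arr s1 (colList gap arr s1 r2, res) c2
          = (colList gap arr s1 (c2 :: r2), res ++ [dpD gap arr s1.reverse (c2 :: r2)]) := by
        simp [stepB, newColB_eq, colList_last]
      rw [hcol, ih (c2 :: r2) _]
      simp [lastVals]

theorem initColB (gap : Int) (arr : List (List Int)) :
    ∀ (u r1 : List Char),
      (List.range (u.length + 1)).map (fun (k : Nat) => ((r1.length : Int) + (k : Int)) * gap)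
        = dpD gap arr r1 [] :: extVals gap arr [] r1 u := by
  intro u
  induction u with
  | nil => intro r1; simp [extVals, dpD_nil_right]
  | cons c u ih =>
      intro r1
      rw [List.range_succ_eq_map, List.map_cons, List.map_map]
      simp only [extVals]
      congr 1
      · simp [dpD_nil_right]
      · rw [← ih (c :: r1)]
        apply List.map_congr_left
        intro k _
        simp only [Function.comp_apply, List.length_cons]
        push_cast
        ring

theorem compute_last_row_alt_eq (seq1 : String) (seq2 : String) (gap : Int) (arr : List (List Int)) :
    compute_last_row_alt seq1 seq2 gap arr =
      dpD gap arr seq1.toList.reverse [] :: lastVals gap arr seq1.toList [] seq2.toList := by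
  show (seq2.toList.foldl (stepB gap arr seq1.toList)
      ((PySem.List.pyRange 0 ((seq1.toList.length : Int) + 1) 1).map (fun i => i * gap),
       [PySem.List.pyGetD ((PySem.List.pyRange 0 ((seq1.toList.length : Int) + 1) 1).map (fun i => i * gap)) (-1) 0])).2
      = _
  have hcol0 : (PySem.List.pyRange 0 ((seq1.toList.length : Int) + 1) 1).map (fun i => i * gap)
      = colList gap arr seq1.toList [] := by
    rw [PySem.List.pyRange_one]
    rw [show (((seq1.toList.length : Int) + 1) - 0).toNat = seq1.toList.length + 1 by omega, List.map_map]
    rw [show colList gap arr seq1.toList [] = dpD gap arr [] [] :: extVals gap arr [] [] seq1.toList from rfl]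
    rw [← initColB gap arr seq1.toList []]
    apply List.map_congr_left
    intro k _
    simp
  rw [hcol0, colList_last]
  rw [outerB gap arr seq1.toList seq2.toList [] _]
  simp

-- ---- bridge: the A-side map over prefixes IS the B-side list of last entries ----
theorem bridge (gap : Int) (arr : List (List Int)) (s1 : List Char) :
    ∀ (l2 p2 : List Char),
      (List.range (l2.length + 1)).map
          (fun k => dpD gap arr s1.reverse (((p2 ++ l2).take (p2.length + k)).reverse))
        = dpD gap arr s1.reverse p2.reverse :: lastVals gap arr s1 p2.reverse l2 := by
  intro l2
  induction l2 with
  | nil => intro p2; simp [lastVals]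
  | cons c l2 ih =>
      intro p2
      rw [List.range_succ_eq_map, List.map_cons, List.map_map]
      simp only [lastVals]
      congr 1
      · rw [Nat.add_zero, List.take_left]
      · have hh := ih (p2 ++ [c])
        rw [show (p2 ++ [c]).reverse = c :: p2.reverse by simp] at hh
        rw [← hh]
        apply List.map_congr_left
        intro k _
        have h1 : p2 ++ [c] ++ l2 = p2 ++ c :: l2 := by simp
        have h2 : (p2 ++ [c]).length + k = p2.length + (k + 1) := by simp only [List.length_append, List.length_cons, List.length_nil]; omega
        simp only [Function.comp_apply, Nat.succ_eq_add_one, h1, h2]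

theorem rowMap_eq_lastVals (gap : Int) (arr : List (List Int)) (s1 s2 : List Char) :
    rowMap gap arr s2 s1.reverse = dpD gap arr s1.reverse [] :: lastVals gap arr s1 [] s2 := by
  have := bridge gap arr s1 s2 []
  simpa [rowMap] using this

-- ===== VERDICT (by name: the statement is the Claim_ definition above) =====
theorem compute_last_row_spec : Claim_equal_compute_last_row := by
  intro seq1 seq2 gap arr _ _
  unfold Spec_compute_last_row
  rw [compute_last_row_eq, compute_last_row_alt_eq, rowMap_eq_lastVals]
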